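-- pv_equiv track=rewrite | github.com/FabianForsman/TDA548 | Exercises/Exempeltenta/Exempeltenta_med_svar.py | add_all_positive
-- ===== SOURCE A (Python) =====
-- def add_all_positive(the_matrix, size):
--     nr_subs_height, nr_subs_width = determine_nr_of_subs(the_matrix, size)
--     result = []
--     for i in range(nr_subs_height):
--         for j in range(nr_subs_width):
--             sub_matrix = get_sub_matrix(the_matrix, i, j, size)
--             add_if_positive(result, sub_matrix)
--     return result
--
-- def add_if_positive(result, sub_matrix):
--     if sum_matrix(sub_matrix) > 0:
--         result.append(sub_matrix)
--
-- def determine_nr_of_subs(the_matrix, size):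
--     height, width = get_height_and_width(the_matrix)
--     nr_subs_height = max(0, height - size + 1)  # if size is larger than height or width,
--     nr_subs_width  = max(0, width  - size + 1)  # the task will be impossible
--     return nr_subs_height, nr_subs_width
--
-- def get_sub_matrix(the_matrix, start_row, start_col, size):
--     return [row[start_col:start_col + size]
--             for row in the_matrix[start_row:start_row + size]]
--
-- def sum_matrix(matrix_to_sum):
--     return sum(map(sum, matrix_to_sum))
--
-- def get_height_and_width(the_matrix):
--     height = len(the_matrix)
--     width = 0 if height == 0 else len(the_matrix[0])
--     return height, width
-- ===== SOURCE B (Python) =====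
-- def add_all_positive(the_matrix, size):
--     height = len(the_matrix)
--     width = len(the_matrix[0]) if the_matrix else 0
--     ncols = width - size + 1
--     row_sums = [[sum(row[j:j + size]) for j in range(ncols)] for row in the_matrix]
--     result = []
--     for i in range(height - size + 1):
--         for j in range(ncols):
--             if sum(sums[j] for sums in row_sums[i:i + size]) > 0:
--                 result.append([row[j:j + size] for row in the_matrix[i:i + size]])
--     return result
-- ===== Notes on version B (the rewrite author's own statement) =====
-- stated objective: alternative
-- what changed: B precomputes each row's sliding-window sums in one table, tests every window by summing size table entries instead of slicing out and re-summing a size-by-size submatrix, and materialises a submatrix only for positive windows.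
import Mathlib
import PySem

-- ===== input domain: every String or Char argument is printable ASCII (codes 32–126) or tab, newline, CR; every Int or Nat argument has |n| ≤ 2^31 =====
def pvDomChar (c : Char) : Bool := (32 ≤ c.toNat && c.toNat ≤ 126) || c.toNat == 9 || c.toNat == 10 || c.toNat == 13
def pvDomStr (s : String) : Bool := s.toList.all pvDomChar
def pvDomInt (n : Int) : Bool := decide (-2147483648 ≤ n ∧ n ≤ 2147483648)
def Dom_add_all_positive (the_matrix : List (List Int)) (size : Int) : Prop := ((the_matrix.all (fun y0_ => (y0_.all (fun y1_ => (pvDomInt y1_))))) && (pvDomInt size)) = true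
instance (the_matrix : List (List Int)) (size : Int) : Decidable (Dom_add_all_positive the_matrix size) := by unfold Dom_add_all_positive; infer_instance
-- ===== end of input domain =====

-- B precomputes each row's sliding-window sums once and tests each window by summing size
-- precomputed entries, slicing out a submatrix only when the window is positive (alternative decomposition).

-- ===== PORT A =====
def get_height_and_width (the_matrix : List (List Int)) : Int × Int :=
  let height : Int := the_matrix.length
  -- the_matrix[0] is guarded by 'height == 0' in the Python; headD is only reached when nonempty
  let width : Int := if height == 0 then 0 else ((the_matrix.headD []).length : Int)
  (height, width)

def determine_nr_of_subs (the_matrix : List (List Int)) (size : Int) : Int × Int :=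
  let hw := get_height_and_width the_matrix
  (max 0 (hw.1 - size + 1), max 0 (hw.2 - size + 1))

def get_sub_matrix (the_matrix : List (List Int)) (start_row start_col size : Int) : List (List Int) :=
  (PySem.List.slice the_matrix (some start_row) (some (start_row + size))).map
    (fun row => PySem.List.slice row (some start_col) (some (start_col + size)))

def sum_matrix (matrix_to_sum : List (List Int)) : Int :=
  (matrix_to_sum.map List.sum).sum

def add_if_positive (result : List (List (List Int))) (sub_matrix : List (List Int)) :
    List (List (List Int)) :=
  if sum_matrix sub_matrix > 0 then result ++ [sub_matrix] else result

def add_all_positive (the_matrix : List (List Int)) (size : Int) : List (List (List Int)) :=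
  let ns := determine_nr_of_subs the_matrix size
  (PySem.List.pyRange 0 ns.1 1).foldl (fun result i =>
    (PySem.List.pyRange 0 ns.2 1).foldl (fun result j =>
      add_if_positive result (get_sub_matrix the_matrix i j size)) result) []

-- ===== PORT B =====
def add_all_positive_alt (the_matrix : List (List Int)) (size : Int) : List (List (List Int)) :=
  let height : Int := the_matrix.length
  let width : Int := if the_matrix.isEmpty then 0 else ((the_matrix.headD []).length : Int)
  let ncols : Int := width - size + 1
  let row_sums : List (List Int) := the_matrix.map (fun row =>
    (PySem.List.pyRange 0 ncols 1).map (fun j =>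
      (PySem.List.slice row (some j) (some (j + size))).sum))
  (PySem.List.pyRange 0 (height - size + 1) 1).foldl (fun result i =>
    (PySem.List.pyRange 0 ncols 1).foldl (fun result j =>
      -- sums[j]: j comes from range(ncols) and every row of row_sums has ncols entries, so in range
      if ((PySem.List.slice row_sums (some i) (some (i + size))).map
            (fun sums => PySem.List.pyGetD sums j 0)).sum > 0 then
        result ++ [(PySem.List.slice the_matrix (some i) (some (i + size))).map
                     (fun row => PySem.List.slice row (some j) (some (j + size)))]
      else result) result) []

-- ===== PRECONDITION & SPEC =====
def Spec_add_all_positive (the_matrix : List (List Int)) (size : Int) (out : List (List (List Int))) : Prop := out = add_all_positive_alt the_matrix size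
instance (the_matrix : List (List Int)) (size : Int) (out : List (List (List Int))) : Decidable (Spec_add_all_positive the_matrix size out) := by unfold Spec_add_all_positive; infer_instance

-- ===== CLAIM (what is proved, stated in full; the proofs are below) =====
def Claim_equal_add_all_positive : Prop := ∀ (the_matrix : List (List Int)) (size : Int), Dom_add_all_positive the_matrix size → Spec_add_all_positive the_matrix size (add_all_positive the_matrix size)

-- ===== LEMMAS AND PROOFS =====

-- range(max(0, n)) = range(n)
lemma pyRange_max0 (n : Int) : PySem.List.pyRange 0 (max 0 n) 1 = PySem.List.pyRange 0 n 1 := by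
  rw [PySem.List.pyRange_one, PySem.List.pyRange_one]
  congr 2
  omega

-- slicing commutes with map (slice picks positions, map preserves length)
lemma slice_map {α β : Type} (f : α → β) (xs : List α) (a b : Option Int) :
    PySem.List.slice (xs.map f) a b = (PySem.List.slice xs a b).map f := by
  simp [PySem.List.slice, List.map_drop, List.map_take]

-- per-window: B's table lookups re-sum exactly A's freshly sliced submatrix
lemma window_sum_eq (the_matrix : List (List Int)) (i j size ncols : Int)
    (hj0 : 0 ≤ j) (hj : j < ncols) :
    ((PySem.List.slice (the_matrix.map (fun row =>
        (PySem.List.pyRange 0 ncols 1).map (fun j' =>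
          (PySem.List.slice row (some j') (some (j' + size))).sum)))
        (some i) (some (i + size))).map
        (fun sums => PySem.List.pyGetD sums j 0)).sum
      = sum_matrix (get_sub_matrix the_matrix i j size) := by
  rw [slice_map, List.map_map, sum_matrix, get_sub_matrix, List.map_map]
  congr 1
  apply List.map_congr_left
  intro row _
  simp only [Function.comp_def]
  rw [PySem.List.pyGetD_map_pyRange_of_nonneg _ ncols j 0 hj0 hj]

-- ===== VERDICT (by name: the statement is the Claim_ definition above) =====
theorem add_all_positive_spec : Claim_equal_add_all_positive := by
  unfold Claim_equal_add_all_positive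
  intro the_matrix size _
  unfold Spec_add_all_positive
  unfold add_all_positive add_all_positive_alt determine_nr_of_subs get_height_and_width
  simp only []
  have hw : (if ((the_matrix.length : Int)) == 0 then (0 : Int)
        else ((the_matrix.headD []).length : Int))
      = (if the_matrix.isEmpty then (0 : Int) else ((the_matrix.headD []).length : Int)) := by
    cases the_matrix with
    | nil => simp
    | cons r t => simp; omega
  rw [hw, pyRange_max0, pyRange_max0]
  apply PySem.List.foldl_congr_mem
  intro acc i _
  apply PySem.List.foldl_congr_mem
  intro acc2 j hj
  obtain ⟨hj0, hjlt⟩ := (PySem.List.mem_pyRange_one).1 hj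
  rw [add_if_positive, window_sum_eq the_matrix i j size _ hj0 hjlt, get_sub_matrix]
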